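-- pv_equiv track=rewrite | github.com/MathGloss/MathGloss | scripts/make_clowder_suggestions.py | dedupe_by_suggestion
-- ===== SOURCE A (Python) =====
-- from typing import List, Dict, Tuple, Any
--
-- def _post_colon_first_token(title: str) -> str:
--     s = title.split(':', 1)[1] if ':' in title else title
--     s = s.strip().replace('-', ' ')
--     return (s.split()[0].lower() if s else '')
--
-- def dedupe_by_suggestion(rows: List[Dict[str, Any]]) -> List[Dict[str, Any]]:
--     # Map suggestion -> (row_index, row_dict, starts_with_section)
--     chosen: Dict[str, Tuple[int, Dict[str, Any], bool]] = {}
--     for idx, r in enumerate(rows):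
--         s = (r.get('suggestion') or '').strip()
--         title = (r.get('title') or '').strip()
--         first = _post_colon_first_token(title)
--         starts_with_section = first in {'section', 'subsection'}
--         if s not in chosen:
--             chosen[s] = (idx, r, starts_with_section)
--         else:
--             prev_idx, prev_row, prev_is_section = chosen[s]
--             # Prefer the one that is NOT section/subsection
--             if prev_is_section and not starts_with_section:
--                 chosen[s] = (idx, r, starts_with_section)
--             # else keep the previous (stable)
--     kept = sorted(chosen.values(), key=lambda t: t[0])
--     return [r for _, r, _ in kept]
-- ===== SOURCE B (Python) =====
-- from typing import List, Dict, Tuple, Any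
--
-- def _post_colon_first_token(title: str) -> str:
--     s = title.split(':', 1)[1] if ':' in title else title
--     s = s.strip().replace('-', ' ')
--     return (s.split()[0].lower() if s else '')
--
-- def dedupe_by_suggestion(rows: List[Dict[str, Any]]) -> List[Dict[str, Any]]:
--     # Pass 1: group the enumerated rows by cleaned suggestion key, in first-seen order.
--     groups: Dict[str, List[Tuple[int, Dict[str, Any], bool]]] = {}
--     for idx, r in enumerate(rows):
--         s = (r.get('suggestion') or '').strip()
--         title = (r.get('title') or '').strip()
--         is_section = _post_colon_first_token(title) in ('section', 'subsection')
--         groups.setdefault(s, []).append((idx, r, is_section))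
--     # Pass 2: reduce each group to its first non-section row, else its first row.
--     picked = []
--     for group in groups.values():
--         non_section = [t for t in group if not t[2]]
--         picked.append(non_section[0] if non_section else group[0])
--     picked.sort(key=lambda t: t[0])
--     return [r for _, r, _ in picked]
-- ===== Notes on version B (the rewrite author's own statement) =====
-- stated objective: alternative
-- what changed: Replaces A's single-pass running-best dict update with a two-pass group-then-reduce decomposition: first group enumerated rows by cleaned suggestion key, then reduce each group to its first non-section row (else its first row) and sort the picks by index.
import Mathlib
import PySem

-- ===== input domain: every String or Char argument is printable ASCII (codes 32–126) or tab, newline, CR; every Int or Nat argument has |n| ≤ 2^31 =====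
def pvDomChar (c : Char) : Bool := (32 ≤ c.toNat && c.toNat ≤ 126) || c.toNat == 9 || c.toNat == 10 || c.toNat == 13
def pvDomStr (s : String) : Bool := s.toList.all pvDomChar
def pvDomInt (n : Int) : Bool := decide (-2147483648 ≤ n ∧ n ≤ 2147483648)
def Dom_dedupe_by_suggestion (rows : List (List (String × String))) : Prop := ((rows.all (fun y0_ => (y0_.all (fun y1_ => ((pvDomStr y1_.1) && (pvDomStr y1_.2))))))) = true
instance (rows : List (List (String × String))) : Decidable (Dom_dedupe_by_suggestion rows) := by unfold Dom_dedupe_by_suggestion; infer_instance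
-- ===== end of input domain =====

-- B replaces A's inline running-best dict update by an explicit group-then-reduce decomposition
-- (group rows by key, then pick first non-section else first, then sort by index); objective: alternative.

-- ===== PORT A =====
-- shared same-module helper _post_colon_first_token, split into the pre-token stem …
def pyTitleStem (title : String) : String :=
  let s0 := if PySem.Str.isIn ":" title then ((PySem.Str.splitMax? title ":" 1).getD []).getD 1 ""
            else title
  PySem.Str.replace (PySem.Str.strip s0) "-" " "

-- … and the first-token extraction (s.split()[0] raises IndexError when s is nonempty
-- whitespace; the default "" there is unreachable under Pre_, which excludes such titles)
def pyPostColonFirstToken (title : String) : String :=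
  let s := pyTitleStem title
  if s ≠ "" then PySem.Str.lower ((PySem.Str.split₀ s).getD 0 "") else ""

-- the body of A's for-loop (one dict-update step)
def dedupeA_step (chosen : PySem.Dict String (Int × List (String × String) × Bool))
    (p : Int × List (String × String)) :
    PySem.Dict String (Int × List (String × String) × Bool) :=
  let idx := p.1
  let r := p.2
  let s := PySem.Str.strip (PySem.Dict.getD (PySem.Dict.mk r) "suggestion" "")
  let title := PySem.Str.strip (PySem.Dict.getD (PySem.Dict.mk r) "title" "")
  let first := pyPostColonFirstToken title
  let starts_with_section : Bool := first == "section" || first == "subsection"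
  if ¬ (PySem.Dict.contains chosen s) then
    PySem.Dict.insert chosen s (idx, r, starts_with_section)
  else
    let prev := (PySem.Dict.get? chosen s).getD (0, [], false)
    if prev.2.2 && !starts_with_section then
      PySem.Dict.insert chosen s (idx, r, starts_with_section)
    else chosen

def dedupe_by_suggestion (rows : List (List (String × String))) : List (List (String × String)) :=
  let chosen := (PySem.List.enumerate rows 0).foldl dedupeA_step (PySem.Dict.mk [])
  (PySem.List.sorted chosen.values (fun t => t.1)).map (fun t => t.2.1)

-- ===== PORT B =====
-- reduce one group: first non-section element, else first element (B's pass 2 body)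
def pickFirstNonSection (g : List (Int × List (String × String) × Bool)) :
    Int × List (String × String) × Bool :=
  match g.filter (fun t => !t.2.2) with
  | [] => g.headD (0, [], false)
  | t :: _ => t

-- the body of B's pass-1 loop (append the enumerated row to its key's group)
def dedupeB_step (groups : PySem.Dict String (List (Int × List (String × String) × Bool)))
    (p : Int × List (String × String)) :
    PySem.Dict String (List (Int × List (String × String) × Bool)) :=
  let idx := p.1
  let r := p.2
  let s := PySem.Str.strip (PySem.Dict.getD (PySem.Dict.mk r) "suggestion" "")
  let title := PySem.Str.strip (PySem.Dict.getD (PySem.Dict.mk r) "title" "")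
  let first := pyPostColonFirstToken title
  let is_section : Bool := first == "section" || first == "subsection"
  PySem.Dict.insert groups s (PySem.Dict.getD groups s [] ++ [(idx, r, is_section)])

def dedupe_by_suggestion_alt (rows : List (List (String × String))) : List (List (String × String)) :=
  let groups := (PySem.List.enumerate rows 0).foldl dedupeB_step (PySem.Dict.mk [])
  let picked := groups.values.foldl (fun acc g => acc ++ [pickFirstNonSection g]) []
  (PySem.List.sorted picked (fun t => t.1)).map (fun t => t.2.1)

-- ===== PRECONDITION & SPEC =====
-- Pre_ excludes rows whose title's post-colon part strips/replaces to a nonempty whitespace-only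
-- string (e.g. title '-'): there s.split()[0] raises IndexError in A (and in B, same helper).
def Pre_dedupe_by_suggestion (rows : List (List (String × String))) : Prop :=
  (rows.all (fun r =>
    let s := pyTitleStem (PySem.Str.strip (PySem.Dict.getD (PySem.Dict.mk r) "title" ""))
    s == "" || !(PySem.Str.split₀ s).isEmpty)) = true
instance (rows : List (List (String × String))) : Decidable (Pre_dedupe_by_suggestion rows) := by
  unfold Pre_dedupe_by_suggestion; infer_instance

def pvWitness_dedupe_by_suggestion : List (List (String × String)) :=
  [[("suggestion", "x"), ("title", "Topic: foo-bar")], [("suggestion", "x"), ("title", "Section: x")]]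

def Spec_dedupe_by_suggestion (rows : List (List (String × String))) (out : List (List (String × String))) : Prop := out = dedupe_by_suggestion_alt rows
instance (rows : List (List (String × String))) (out : List (List (String × String))) : Decidable (Spec_dedupe_by_suggestion rows out) := by unfold Spec_dedupe_by_suggestion; infer_instance

-- ===== CLAIM (what is proved, stated in full; the proofs are below) =====
def Claim_equal_dedupe_by_suggestion : Prop := ∀ (rows : List (List (String × String))), Dom_dedupe_by_suggestion rows → Pre_dedupe_by_suggestion rows → Spec_dedupe_by_suggestion rows (dedupe_by_suggestion rows)

-- ===== LEMMAS AND PROOFS =====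

-- abbreviations for the proof layer
abbrev DEnt := Int × List (String × String) × Bool
def mapPick (p : String × List DEnt) : String × DEnt := (p.1, pickFirstNonSection p.2)

lemma pick_singleton (t : DEnt) : pickFirstNonSection [t] = t := by
  unfold pickFirstNonSection
  by_cases h : t.2.2 <;> simp [List.filter, h]

lemma filter_eq_nil_of_pick_sec (g : List DEnt) (h : (pickFirstNonSection g).2.2 = true) :
    g.filter (fun t => !t.2.2) = [] := by
  unfold pickFirstNonSection at h
  cases hf : g.filter (fun t => !t.2.2) with
  | nil => rfl
  | cons t ts =>
    exfalso
    have hm : t ∈ g.filter (fun t => !t.2.2) := by rw [hf]; exact List.mem_cons_self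
    have ht := (List.mem_filter.mp hm).2
    rw [hf] at h; simp at h ht; simp [h] at ht

lemma pick_append_of_sec (g : List DEnt) (t : DEnt)
    (hs : (pickFirstNonSection g).2.2 = true) (ht : t.2.2 = false) :
    pickFirstNonSection (g ++ [t]) = t := by
  have hf := filter_eq_nil_of_pick_sec g hs
  unfold pickFirstNonSection
  simp [List.filter_append, hf, List.filter, ht]

lemma pick_append_keep (g : List DEnt) (t : DEnt) (hg : g ≠ [])
    (h : ((pickFirstNonSection g).2.2 && !t.2.2) = false) :
    pickFirstNonSection (g ++ [t]) = pickFirstNonSection g := by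
  cases hf : g.filter (fun t => !t.2.2) with
  | cons u us =>
    unfold pickFirstNonSection
    simp [List.filter_append, hf]
  | nil =>
    cases g with
    | nil => exact absurd rfl hg
    | cons a as =>
      have ha : a.2.2 = true := by
        by_contra hb
        simp only [Bool.not_eq_true] at hb
        have : a ∈ (a :: as).filter (fun t => !t.2.2) :=
          List.mem_filter_of_mem List.mem_cons_self (by simp [hb])
        rw [hf] at this; exact absurd this List.not_mem_nil
      have hfas : as.filter (fun t => !t.2.2) = [] := by
        simpa [List.filter_cons, ha] using hf
      have hpick : pickFirstNonSection (a :: as) = a := by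
        unfold pickFirstNonSection; simp [hf]
      rw [hpick] at h ⊢
      have ht : t.2.2 = true := by rw [ha] at h; simpa using h
      unfold pickFirstNonSection
      simp [List.filter_append, List.filter_cons, ha, hfas, ht]

-- association-list facts connecting A's dict to B's grouped dict
lemma get?_map_mapPick (l : List (String × List DEnt)) (s : String) :
    PySem.Dict.get? (PySem.Dict.mk (l.map mapPick)) s
      = (PySem.Dict.get? (PySem.Dict.mk l) s).map pickFirstNonSection := by
  induction l with
  | nil => rfl
  | cons p tl ih =>
    by_cases h : p.1 == s <;>
      simp [PySem.Dict.get?, mapPick, List.find?, h] at ih ⊢ <;> simpa [PySem.Dict.get?] using ih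

lemma contains_map_mapPick (l : List (String × List DEnt)) (s : String) :
    PySem.Dict.contains (PySem.Dict.mk (l.map mapPick)) s
      = PySem.Dict.contains (PySem.Dict.mk l) s := by
  simp only [PySem.Dict.contains, List.any_map, Function.comp_def]
  rfl

lemma items_insert_true (l : List (String × List DEnt)) (s : String) (w : List DEnt)
    (hc : PySem.Dict.contains (PySem.Dict.mk l) s = true) :
    (PySem.Dict.insert (PySem.Dict.mk l) s w).items
      = l.map (fun p => if p.1 == s then (s, w) else p) := by
  simp [PySem.Dict.insert, hc]

lemma items_insert_false (l : List (String × List DEnt)) (s : String) (w : List DEnt)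
    (hc : PySem.Dict.contains (PySem.Dict.mk l) s = false) :
    (PySem.Dict.insert (PySem.Dict.mk l) s w).items = l ++ [(s, w)] := by
  simp [PySem.Dict.insert, hc]

lemma keys_replace (l : List (String × List DEnt)) (s : String) (w : List DEnt) :
    (l.map (fun p => if p.1 == s then (s, w) else p)).map Prod.fst = l.map Prod.fst := by
  rw [List.map_map]
  apply List.map_congr_left
  intro p _
  by_cases h : p.1 = s <;> simp [h]

lemma insert_map_mapPick (l : List (String × List DEnt)) (s : String) (g : List DEnt) :
    PySem.Dict.insert (PySem.Dict.mk (l.map mapPick)) s (pickFirstNonSection g)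
      = PySem.Dict.mk ((PySem.Dict.insert (PySem.Dict.mk l) s g).items.map mapPick) := by
  unfold PySem.Dict.insert
  rw [contains_map_mapPick]
  by_cases hc : PySem.Dict.contains (PySem.Dict.mk l) s <;> simp [hc, mapPick]
  · intro a b _
    by_cases h : a = s <;> simp [h]

lemma mem_val_eq_of_nodup (l : List (String × List DEnt)) (s : String) (g : List DEnt)
    (hnd : (l.map Prod.fst).Nodup)
    (hget : PySem.Dict.get? (PySem.Dict.mk l) s = some g) :
    ∀ p ∈ l, p.1 = s → p.2 = g := by
  induction l with
  | nil => simp [PySem.Dict.get?] at hget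
  | cons q tl ih =>
    intro p hp hps
    simp only [List.map_cons, List.nodup_cons] at hnd
    by_cases h : q.1 == s
    · have hq : g = q.2 := by
        simp [PySem.Dict.get?, List.find?_cons, h] at hget; exact hget.symm
      rcases List.mem_cons.mp hp with rfl | hp
      · exact hq.symm
      · exfalso
        exact hnd.1 (by rw [eq_of_beq h, ← hps]; exact List.mem_map_of_mem hp)
    · rcases List.mem_cons.mp hp with rfl | hp
      · exact absurd (by simp [hps]) h
      · refine ih hnd.2 ?_ p hp hps
        simpa [PySem.Dict.get?, List.find?_cons, h] using hget

lemma replace_map_mapPick (l : List (String × List DEnt)) (s : String) (w : List DEnt)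
    (h : ∀ p ∈ l, p.1 = s → pickFirstNonSection w = pickFirstNonSection p.2) :
    (l.map (fun p => if p.1 == s then (s, w) else p)).map mapPick = l.map mapPick := by
  rw [List.map_map]
  apply List.map_congr_left
  intro p hp
  by_cases hb : p.1 == s
  · have hps := eq_of_beq hb
    have := h p hp hps
    simp [mapPick, hb, hps, this]
  · have hb' : p.1 ≠ s := by simpa using hb
    simp [mapPick, hb']

-- the one-step simulation between A's dict and B's grouped dict, with the per-row
-- computed key sv and section flag sec abstracted as variables
lemma step_core (l : List (String × List DEnt)) (idx : Int) (r : List (String × String))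
    (sv : String) (sec : Bool)
    (hnd : (l.map Prod.fst).Nodup) (hne : ∀ p ∈ l, p.2 ≠ []) :
    (if ¬ PySem.Dict.contains (PySem.Dict.mk (l.map mapPick)) sv then
        PySem.Dict.insert (PySem.Dict.mk (l.map mapPick)) sv (idx, r, sec)
      else
        if ((PySem.Dict.get? (PySem.Dict.mk (l.map mapPick)) sv).getD (0, [], false)).2.2
            && !sec then
          PySem.Dict.insert (PySem.Dict.mk (l.map mapPick)) sv (idx, r, sec)
        else PySem.Dict.mk (l.map mapPick))
      = PySem.Dict.mk ((PySem.Dict.insert (PySem.Dict.mk l) sv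
          (PySem.Dict.getD (PySem.Dict.mk l) sv [] ++ [(idx, r, sec)])).items.map mapPick)
    ∧ ((PySem.Dict.insert (PySem.Dict.mk l) sv
          (PySem.Dict.getD (PySem.Dict.mk l) sv [] ++ [(idx, r, sec)])).items.map Prod.fst).Nodup
    ∧ ∀ p ∈ (PySem.Dict.insert (PySem.Dict.mk l) sv
          (PySem.Dict.getD (PySem.Dict.mk l) sv [] ++ [(idx, r, sec)])).items, p.2 ≠ [] := by
  by_cases hc : PySem.Dict.contains (PySem.Dict.mk l) sv = true
  · -- key already present: B appends to its group
    have hfind : ∃ q ∈ l, (q.1 == sv) = true := by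
      simpa [PySem.Dict.contains, List.any_eq_true] using hc
    have hsome : (List.find? (fun p => p.1 == sv) l).isSome := List.find?_isSome.mpr hfind
    obtain ⟨q0, hq0⟩ := Option.isSome_iff_exists.mp hsome
    have hq0mem : q0 ∈ l := List.mem_of_find?_eq_some hq0
    have hget : PySem.Dict.get? (PySem.Dict.mk l) sv = some q0.2 := by
      simp [PySem.Dict.get?, hq0]
    have hg : q0.2 ≠ [] := hne q0 hq0mem
    have hgetD : PySem.Dict.getD (PySem.Dict.mk l) sv [] = q0.2 := by
      simp [PySem.Dict.getD, hget]
    have hcm : PySem.Dict.contains (PySem.Dict.mk (l.map mapPick)) sv = true := by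
      rw [contains_map_mapPick]; exact hc
    have hprev : PySem.Dict.get? (PySem.Dict.mk (l.map mapPick)) sv
        = some (pickFirstNonSection q0.2) := by
      rw [get?_map_mapPick, hget]; rfl
    have hitems := items_insert_true l sv (q0.2 ++ [(idx, r, sec)]) hc
    rw [hgetD, hprev]
    refine ⟨?_, ?_, ?_⟩
    · rw [if_neg (by simp [hcm])]
      simp only [Option.getD_some]
      by_cases h2 : ((pickFirstNonSection q0.2).2.2 && !sec) = true
      · -- previous pick is a section row, new row is not: both switch to the new row
        rw [if_pos h2]
        have h2' : (pickFirstNonSection q0.2).2.2 = true ∧ sec = false := by simpa using h2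
        have hpick : pickFirstNonSection (q0.2 ++ [(idx, r, sec)]) = (idx, r, sec) :=
          pick_append_of_sec q0.2 (idx, r, sec) h2'.1 h2'.2
        have heq := insert_map_mapPick l sv (q0.2 ++ [(idx, r, sec)])
        rw [hpick] at heq
        exact heq
      · -- A keeps its entry and B's new pick is unchanged
        rw [if_neg h2, hitems]
        refine congrArg PySem.Dict.mk (replace_map_mapPick l sv (q0.2 ++ [(idx, r, sec)]) ?_).symm
        intro p hp hps
        rw [mem_val_eq_of_nodup l sv q0.2 hnd hget p hp hps]
        exact pick_append_keep q0.2 (idx, r, sec) hg (by simpa using h2)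
    · rw [hitems, keys_replace]; exact hnd
    · rw [hitems]
      intro p hp
      obtain ⟨q, hq, rfl⟩ := List.mem_map.mp hp
      by_cases h : q.1 == sv <;> simp [h]
      exact hne q hq
  · -- new key: both sides append a fresh entry
    have hc' : PySem.Dict.contains (PySem.Dict.mk l) sv = false := Bool.eq_false_iff.mpr hc
    have hcm : PySem.Dict.contains (PySem.Dict.mk (l.map mapPick)) sv = false := by
      rw [contains_map_mapPick]; exact hc'
    have hnone : List.find? (fun p => p.1 == sv) l = none := by
      rw [List.find?_eq_none]
      intro q hq
      simp only [PySem.Dict.contains] at hc'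
      simpa using List.any_eq_false.mp hc' q hq
    have hgetD : PySem.Dict.getD (PySem.Dict.mk l) sv [] = ([] : List DEnt) := by
      simp [PySem.Dict.getD, PySem.Dict.get?, hnone]
    have hitems := items_insert_false l sv [(idx, r, sec)] hc'
    have hnotmem : ∀ q ∈ l, q.1 ≠ sv := by
      intro q hq
      simp only [PySem.Dict.contains] at hc'
      simpa using List.any_eq_false.mp hc' q hq
    rw [hgetD, List.nil_append]
    refine ⟨?_, ?_, ?_⟩
    · rw [if_pos (by simp [hcm])]
      have heq := insert_map_mapPick l sv [(idx, r, sec)]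
      rw [pick_singleton] at heq
      exact heq
    · rw [hitems, List.map_append, List.nodup_append]
      refine ⟨hnd, List.nodup_singleton _, ?_⟩
      intro a ha b hb
      obtain ⟨q, hq, rfl⟩ := List.mem_map.mp ha
      have hb' : b = sv := by simpa using hb
      subst hb'
      exact hnotmem q hq
    · rw [hitems]
      intro p hp
      rcases List.mem_append.mp hp with h | h
      · exact hne p h
      · simp at h; simp [h]

set_option maxHeartbeats 2000000 in
lemma step_rel (l : List (String × List DEnt)) (x : Int × List (String × String))
    (hnd : (l.map Prod.fst).Nodup) (hne : ∀ p ∈ l, p.2 ≠ []) :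
    dedupeA_step (PySem.Dict.mk (l.map mapPick)) x
        = PySem.Dict.mk ((dedupeB_step (PySem.Dict.mk l) x).items.map mapPick)
      ∧ ((dedupeB_step (PySem.Dict.mk l) x).items.map Prod.fst).Nodup
      ∧ ∀ p ∈ (dedupeB_step (PySem.Dict.mk l) x).items, p.2 ≠ [] :=
  step_core l x.1 x.2
    (PySem.Str.strip (PySem.Dict.getD (PySem.Dict.mk x.2) "suggestion" ""))
    (pyPostColonFirstToken (PySem.Str.strip (PySem.Dict.getD (PySem.Dict.mk x.2) "title" ""))
        == "section"
      || pyPostColonFirstToken (PySem.Str.strip (PySem.Dict.getD (PySem.Dict.mk x.2) "title" ""))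
        == "subsection")
    hnd hne

lemma loop_rel (xs : List (Int × List (String × String))) (l : List (String × List DEnt))
    (hnd : (l.map Prod.fst).Nodup) (hne : ∀ p ∈ l, p.2 ≠ []) :
    xs.foldl dedupeA_step (PySem.Dict.mk (l.map mapPick))
        = PySem.Dict.mk ((xs.foldl dedupeB_step (PySem.Dict.mk l)).items.map mapPick)
      ∧ ((xs.foldl dedupeB_step (PySem.Dict.mk l)).items.map Prod.fst).Nodup
      ∧ ∀ p ∈ (xs.foldl dedupeB_step (PySem.Dict.mk l)).items, p.2 ≠ [] := by
  induction xs generalizing l with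
  | nil => exact ⟨rfl, hnd, hne⟩
  | cons x xs ih =>
    obtain ⟨h1, h2, h3⟩ := step_rel l x hnd hne
    have := ih ((dedupeB_step (PySem.Dict.mk l) x).items) h2 h3
    simpa [List.foldl_cons, h1] using this

-- ===== VERDICT (by name: the statement is the Claim_ definition above) =====
theorem dedupe_by_suggestion_spec : Claim_equal_dedupe_by_suggestion := by
  intro rows _ _
  unfold Spec_dedupe_by_suggestion dedupe_by_suggestion dedupe_by_suggestion_alt
  obtain ⟨h1, _, _⟩ := loop_rel (PySem.List.enumerate rows 0) [] (by simp) (by simp)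
  simp only [List.map_nil] at h1
  simp only [h1, PySem.List.foldl_append_singleton_eq_map, PySem.Dict.values, List.map_map,
    List.nil_append]
  rfl
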